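-- pv_equiv track=rewrite | github.com/FrancoARossi/SySdL-TPs | pruebas.py | a_Product
-- ===== SOURCE A (Python) =====
-- def a_Product (word):
-- 	s = 0
-- 	for c in word:
-- 		if s == 0 and c == '*':
-- 			s = 1
-- 		else:
-- 			s = -1
-- 			break
-- 	return (s == 1)
-- ===== SOURCE B (Python) =====
-- def a_Product(word):
--     return list(word) == ['*']
-- ===== Notes on version B (the rewrite author's own statement) =====
-- stated objective: simpler
-- what changed: Replaces the stateful scan with early break by a single materialize-and-compare: list(word) == ['*'].
import Mathlib
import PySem

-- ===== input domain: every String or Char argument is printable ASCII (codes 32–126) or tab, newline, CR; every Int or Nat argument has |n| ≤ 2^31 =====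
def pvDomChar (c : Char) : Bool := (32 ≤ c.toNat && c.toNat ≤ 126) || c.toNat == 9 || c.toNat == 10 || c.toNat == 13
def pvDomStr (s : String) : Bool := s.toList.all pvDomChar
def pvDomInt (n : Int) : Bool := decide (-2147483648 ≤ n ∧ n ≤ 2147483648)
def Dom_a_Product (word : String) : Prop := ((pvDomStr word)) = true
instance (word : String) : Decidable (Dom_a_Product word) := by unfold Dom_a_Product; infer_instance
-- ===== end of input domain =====

-- B replaces A's state-machine loop (with early break) by a direct comparison of the
-- materialized character list with ['*']; objective: simpler.

-- ===== PORT A =====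
-- A's for-loop with break, ported as structural recursion over the characters with the
-- same state s; the break becomes returning -1 immediately.
def aProductLoop (s : Int) : List Char → Int
  | [] => s
  | c :: rest => if s == 0 && c == '*' then aProductLoop 1 rest else -1

def a_Product (word : String) : Bool := aProductLoop 0 word.toList == 1

-- ===== PORT B =====
def a_Product_alt (word : String) : Bool := word.toList == ['*']

-- ===== PRECONDITION & SPEC =====
def Spec_a_Product (word : String) (out : Bool) : Prop := out = a_Product_alt word
instance (word : String) (out : Bool) : Decidable (Spec_a_Product word out) := by unfold Spec_a_Product; infer_instance

-- ===== CLAIM (what is proved, stated in full; the proofs are below) =====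
def Claim_equal_a_Product : Prop := ∀ (word : String), Dom_a_Product word → Spec_a_Product word (a_Product word)

-- ===== LEMMAS AND PROOFS =====
theorem aProductLoop_char : ∀ (l : List Char),
    (aProductLoop 0 l == 1) = (l == ['*']) := by
  intro l
  match l with
  | [] => rfl
  | [c] =>
    by_cases h : c = '*' <;> simp [aProductLoop, h]
  | c :: d :: rest =>
    by_cases h : c = '*' <;> simp [aProductLoop, h]

-- ===== VERDICT (by name: the statement is the Claim_ definition above) =====
theorem a_Product_spec : Claim_equal_a_Product := by
  intro word _
  unfold Spec_a_Product a_Product a_Product_alt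
  exact aProductLoop_char word.toList
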